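-- pv_equiv track=rewrite | github.com/sam-flahive/dyl-encryption | dyl_0.1.py | letter_output_VII
-- ===== SOURCE A (Python) =====
-- list_of_letters_VII = 'W?:O7CA<Dt5#rLFjwS&J=3MbkKB Zu"-eXc8zhU^~P0T@Il1pn(2/£gfdy4_9sN>\',;%[$Qo)6GE!]*HRvqYVam+|.}{xi'
--
-- def letter_output_VII(number, value):
--           order_of_letters = {}
--           for letter in list_of_letters_VII:
--                    if value % 94 == 0:
--                             order_of_letters[94] = letter
--
--                    else:
--                             order_of_letters[value % 94] = letter
--
--                    value += 1
--           return(order_of_letters[number])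
-- ===== SOURCE B (Python) =====
-- list_of_letters_VII = 'W?:O7CA<Dt5#rLFjwS&J=3MbkKB Zu"-eXc8zhU^~P0T@Il1pn(2/£gfdy4_9sN>\',;%[$Qo)6GE!]*HRvqYVam+|.}{xi'
--
-- def letter_output_VII(number, value):
--     # The dict A builds maps key ((value+i-1) % 94) + 1 to letter i, so the
--     # letter for `number` sits at index (number - value) % 94 of the alphabet.
--     return list_of_letters_VII[(number - value) % 94]
-- ===== Notes on version B (the rewrite author's own statement) =====
-- stated objective: simpler
-- what changed: Replaces the 94-step dict-building loop with a closed-form index: the letter for a valid key is at position (number - value) % 94 of the constant alphabet string.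
import Mathlib
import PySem

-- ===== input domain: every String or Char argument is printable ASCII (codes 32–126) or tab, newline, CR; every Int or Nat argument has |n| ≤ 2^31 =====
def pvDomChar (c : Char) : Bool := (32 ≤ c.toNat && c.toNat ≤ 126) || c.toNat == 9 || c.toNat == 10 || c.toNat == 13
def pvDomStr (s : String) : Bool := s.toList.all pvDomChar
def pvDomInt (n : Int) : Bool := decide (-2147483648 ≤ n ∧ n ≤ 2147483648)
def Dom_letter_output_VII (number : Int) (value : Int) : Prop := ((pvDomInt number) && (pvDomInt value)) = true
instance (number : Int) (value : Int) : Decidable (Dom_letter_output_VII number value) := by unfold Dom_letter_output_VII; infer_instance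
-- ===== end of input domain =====

-- Re-implementation B replaces A's 94-step dict-building loop by direct indexing
-- into the constant alphabet at (number - value) % 94 (objective: simpler).


-- ===== PORT A =====
def pvLetters : String := "W?:O7CA<Dt5#rLFjwS&J=3MbkKB Zu\"-eXc8zhU^~P0T@Il1pn(2/£gfdy4_9sN>',;%[$Qo)6GE!]*HRvqYVam+|.}{xi"

-- the 'for letter in list_of_letters_VII' loop, carrying (dict, value)
def pvALoop : List Char → PySem.Dict Int String → Int → PySem.Dict Int String
  | [], d, _ => d
  | letter :: rest, d, v =>
      pvALoop rest
        (if PySem.Int.mod v 94 = 0 then d.insert 94 (String.ofList [letter])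
         else d.insert (PySem.Int.mod v 94) (String.ofList [letter]))
        (v + 1)

def letter_output_VII (number : Int) (value : Int) : String :=
  ((pvALoop pvLetters.toList PySem.Dict.empty value).get? number).getD ""
  -- .get? = none is exactly Python's KeyError, excluded by Pre_

-- ===== PORT B =====
def letter_output_VII_alt (number : Int) (value : Int) : String :=
  ((PySem.Str.pyGet? pvLetters (PySem.Int.mod (number - value) 94)).map
    (fun c => String.ofList [c])).getD ""
  -- the index is always in range (0 ≤ i < 94 = len), so the getD default is unreachable

-- ===== PRECONDITION & SPEC =====
-- Pre_ excludes exactly the inputs where A raises KeyError: number outside the dict's keys 1..94.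
def Pre_letter_output_VII (number : Int) (value : Int) : Prop := 1 ≤ number ∧ number ≤ 94
instance (number : Int) (value : Int) : Decidable (Pre_letter_output_VII number value) := by unfold Pre_letter_output_VII; infer_instance

def pvWitness_letter_output_VII : Int × Int := (7, -3)

def Spec_letter_output_VII (number : Int) (value : Int) (out : String) : Prop := out = letter_output_VII_alt number value
instance (number : Int) (value : Int) (out : String) : Decidable (Spec_letter_output_VII number value out) := by unfold Spec_letter_output_VII; infer_instance

-- ===== CLAIM (what is proved, stated in full; the proofs are below) =====
def Claim_equal_letter_output_VII : Prop := ∀ (number : Int) (value : Int), Dom_letter_output_VII number value → Pre_letter_output_VII number value → Spec_letter_output_VII number value (letter_output_VII number value)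

-- ===== LEMMAS AND PROOFS =====

-- the key A inserts at loop step with counter v
def pvKey (v : Int) : Int :=
  if PySem.Int.mod v 94 = 0 then 94 else PySem.Int.mod v 94

theorem pvKey_emod (v : Int) : pvKey v = if v % 94 = 0 then 94 else v % 94 := by
  simp [pvKey]

theorem pvKey_inj {v w : Int} (h : pvKey v = pvKey w) : v % 94 = w % 94 := by
  rw [pvKey_emod, pvKey_emod] at h
  have h1 : 0 ≤ v % 94 ∧ v % 94 < 94 := ⟨Int.emod_nonneg _ (by norm_num), Int.emod_lt_of_pos _ (by norm_num)⟩
  have h2 : 0 ≤ w % 94 ∧ w % 94 < 94 := ⟨Int.emod_nonneg _ (by norm_num), Int.emod_lt_of_pos _ (by norm_num)⟩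
  split_ifs at h <;> omega

theorem pvALoop_insert (letter : Char) (rest : List Char) (d : PySem.Dict Int String) (v : Int) :
    pvALoop (letter :: rest) d v = pvALoop rest (d.insert (pvKey v) (String.ofList [letter])) (v + 1) := by
  simp only [pvALoop, pvKey]
  split_ifs <;> rfl

-- keys not touched by the remaining loop steps are preserved
theorem pvALoop_get?_of_ne (cs : List Char) (d : PySem.Dict Int String) (v k : Int)
    (h : ∀ i : Nat, i < cs.length → pvKey (v + i) ≠ k) :
    (pvALoop cs d v).get? k = d.get? k := by
  induction cs generalizing d v with
  | nil => rfl
  | cons c cs ih =>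
      rw [pvALoop_insert, ih _ (v + 1) (fun i hi => by
        have := h (i + 1) (by simpa using Nat.succ_lt_succ hi)
        simpa [add_comm, add_assoc, add_left_comm] using this)]
      exact PySem.Dict.get?_insert_of_ne d _ (fun he => h 0 (by simp) (by simp [he]))

-- the value stored at key k is the letter of the unique step inserting k
theorem pvALoop_get?_of_key (cs : List Char) (d : PySem.Dict Int String) (v k : Int) (i : Nat)
    (hi : i < cs.length) (hk : pvKey (v + i) = k)
    (huniq : ∀ j : Nat, j < cs.length → pvKey (v + j) = k → j = i) :
    (pvALoop cs d v).get? k = some (String.ofList [cs[i]]) := by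
  induction cs generalizing d v i with
  | nil => simp at hi
  | cons c cs ih =>
      rw [pvALoop_insert]
      cases i with
      | zero =>
          rw [pvALoop_get?_of_ne cs _ (v + 1) k (fun j hj => by
            intro hkey
            have := huniq (j + 1) (by simpa using Nat.succ_lt_succ hj)
              (by simpa [add_comm, add_assoc, add_left_comm] using hkey)
            omega)]
          simp only [List.getElem_cons_zero]
          have : pvKey v = k := by simpa using hk
          rw [← this, PySem.Dict.get?_insert_self]
      | succ i' =>
          have := ih (d.insert (pvKey v) (String.ofList [c])) (v + 1) i' (by simpa using Nat.lt_of_succ_lt_succ hi)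
            (by simpa [add_comm, add_assoc, add_left_comm] using hk)
            (fun j hj hkey => by
              have := huniq (j + 1) (by simpa using Nat.succ_lt_succ hj)
                (by simpa [add_comm, add_assoc, add_left_comm] using hkey)
              omega)
          simpa using this

-- ===== VERDICT (by name: the statement is the Claim_ definition above) =====
theorem letter_output_VII_spec : Claim_equal_letter_output_VII := by
  intro number value _ hpre
  unfold Spec_letter_output_VII letter_output_VII letter_output_VII_alt
  obtain ⟨h1, h2⟩ := hpre
  have hmod : PySem.Int.mod (number - value) 94 = (number - value) % 94 :=
    PySem.Int.mod_eq_emod_of_pos (a := number - value) (by norm_num)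
  have hibd : 0 ≤ (number - value) % 94 ∧ (number - value) % 94 < 94 :=
    ⟨Int.emod_nonneg _ (by norm_num), Int.emod_lt_of_pos _ (by norm_num)⟩
  set n : Nat := ((number - value) % 94).toNat with hn
  have hcast : ((n : Nat) : Int) = (number - value) % 94 := Int.toNat_of_nonneg hibd.1
  have hlen : pvLetters.toList.length = 94 := by decide
  have hkeyi : pvKey (value + n) = number := by
    rw [pvKey_emod, hcast]
    have hcong : (value + (number - value) % 94) % 94 = number % 94 := by omega
    rw [hcong]
    split_ifs with h0 <;> omega
  rw [pvALoop_get?_of_key pvLetters.toList PySem.Dict.empty value number n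
    (by omega) hkeyi
    (fun j hj hkey => by
      have := pvKey_inj (hkey.trans hkeyi.symm)
      rw [hlen] at hj
      omega)]
  rw [hmod, ← hcast, PySem.Str.pyGet?_natCast,
    List.getElem?_eq_getElem (by omega : n < pvLetters.toList.length)]
  rfl
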